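-- pv_equiv track=rewrite | github.com/Feteya/Gaudftb | test/ts/Gaudftb.py | list2type
-- ===== SOURCE A (Python) =====
-- def list2type(atomlist):
--     atomtype=[]
--     atomcode=[]
--     for i in range(len(atomlist)):
--         if atomlist[i] not in atomtype:
--             atomtype.append(atomlist[i])
--         atomcode.append(atomtype.index(atomlist[i])+1)
--     return atomtype,atomcode
-- ===== SOURCE B (Python) =====
-- def list2type(atomlist):
--     # first-occurrence positions, ascending = order of first appearance
--     firsts = sorted({atomlist.index(a) for a in atomlist})
--     atomtype = [atomlist[i] for i in firsts]
--     atomcode = [firsts.index(atomlist.index(a)) + 1 for a in atomlist]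
--     return atomtype, atomcode
-- ===== Notes on version B (the rewrite author's own statement) =====
-- stated objective: alternative
-- what changed: Instead of growing a type table inside one loop, B computes the set of first-occurrence indices with atomlist.index, sorts it (ascending = first-appearance order), maps it back through atomlist to get the type list, and ranks each element by the position of its first-occurrence index in that sorted index list.
import Mathlib
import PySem

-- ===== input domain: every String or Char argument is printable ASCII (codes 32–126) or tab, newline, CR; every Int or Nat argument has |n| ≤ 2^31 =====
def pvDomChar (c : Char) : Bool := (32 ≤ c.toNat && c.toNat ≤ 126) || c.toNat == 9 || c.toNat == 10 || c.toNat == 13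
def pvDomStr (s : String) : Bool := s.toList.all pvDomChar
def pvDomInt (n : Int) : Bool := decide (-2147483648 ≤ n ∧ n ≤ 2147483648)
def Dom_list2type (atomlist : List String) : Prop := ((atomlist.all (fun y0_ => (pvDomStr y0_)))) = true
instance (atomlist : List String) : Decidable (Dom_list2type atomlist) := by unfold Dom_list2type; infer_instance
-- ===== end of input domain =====

-- B replaces A's incrementally grown type table by a sorted set of first-occurrence
-- indices (alternative algorithm, similar cost); equivalence proved on all inputs.

-- ===== PORT A =====
-- one loop: grow atomtype on first sight, append atomtype.index(..)+1 each step
def list2type (atomlist : List String) : List String × List Int :=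
  atomlist.foldl
    (fun st a =>
      let atomtype := if st.1.contains a then st.1 else st.1 ++ [a]
      (atomtype, st.2 ++ [(((PySem.List.index? atomtype a).getD 0 : Nat) : Int) + 1]))
    ([], [])

-- ===== PORT B =====
-- firsts = sorted({atomlist.index(a) for a in atomlist}); atomtype = [atomlist[i] for i in firsts];
-- atomcode = [firsts.index(atomlist.index(a)) + 1 for a in atomlist]
-- (.index and atomlist[i] are total here — ported with getD: every argument is a member / in range)
def list2type_alt (atomlist : List String) : List String × List Int :=
  let idx : String → Int := fun a => (((PySem.List.index? atomlist a).getD 0 : Nat) : Int)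
  let firsts : List Int :=
    PySem.List.sorted (PySem.Set.ofList (atomlist.map idx)) (fun x => x) false
  let atomtype : List String := firsts.map (fun i => (PySem.List.pyGet? atomlist i).getD "")
  let atomcode : List Int :=
    atomlist.map (fun a => (((PySem.List.index? firsts (idx a)).getD 0 : Nat) : Int) + 1)
  (atomtype, atomcode)

-- ===== PRECONDITION & SPEC =====
def Spec_list2type (atomlist : List String) (out : List String × List Int) : Prop := out = list2type_alt atomlist
instance (atomlist : List String) (out : List String × List Int) : Decidable (Spec_list2type atomlist out) := by unfold Spec_list2type; infer_instance

-- ===== CLAIM (what is proved, stated in full; the proofs are below) =====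
def Claim_equal_list2type : Prop := ∀ (atomlist : List String), Dom_list2type atomlist → Spec_list2type atomlist (list2type atomlist)

-- ===== LEMMAS AND PROOFS =====

-- atomlist.index(a) as an Int (total on members)
def idxI (l : List String) (a : String) : Int := (((PySem.List.index? l a).getD 0 : Nat) : Int)

theorem add_eq (s : List String) (x : String) :
    (if s.contains x then s else s ++ [x]) = PySem.Set.add s x := rfl

theorem idx_spec (l : List String) (a : String) (h : a ∈ l) :
    ∃ k : Nat, PySem.List.index? l a = some k ∧ k < l.length ∧ l[k]? = some a := by
  obtain ⟨k, hk⟩ := Option.isSome_iff_exists.1 ((PySem.List.index?_isSome_iff l a).2 h)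
  obtain ⟨hlt, hget, -⟩ := PySem.List.getElem_of_index?_eq_some hk
  exact ⟨k, hk, hlt, by simp [hlt, hget]⟩

theorem idxI_lt (l : List String) (a : String) (h : a ∈ l) : idxI l a < (l.length : Int) := by
  obtain ⟨k, hk, hlt, -⟩ := idx_spec l a h
  unfold idxI
  rw [hk]
  simp only [Option.getD_some]
  exact_mod_cast hlt

theorem idxI_inj (l : List String) (a b : String) (ha : a ∈ l) (hb : b ∈ l)
    (h : idxI l a = idxI l b) : a = b := by
  obtain ⟨k, hk, -, hga⟩ := idx_spec l a ha
  obtain ⟨k', hk', -, hgb⟩ := idx_spec l b hb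
  unfold idxI at h
  rw [hk, hk'] at h
  simp only [Option.getD_some] at h
  have hkk : k = k' := by exact_mod_cast h
  subst hkk
  rw [hga] at hgb
  exact Option.some.inj hgb

theorem idxI_append_of_mem (l t : List String) (a : String) (h : a ∈ l) :
    idxI (l ++ t) a = idxI l a := by
  unfold idxI
  rw [PySem.List.index?_append_of_mem t h]

theorem ofList_append_singleton (l : List String) (x : String) :
    PySem.Set.ofList (l ++ [x]) = PySem.Set.add (PySem.Set.ofList l) x := by
  rw [PySem.Set.ofList_eq_foldl, PySem.Set.ofList_eq_foldl, List.foldl_append]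
  rfl

-- the first-occurrence indices of the distinct atoms, in first-appearance order, are strictly increasing
theorem pairwise_idx (l : List String) :
    ((PySem.Set.ofList l).map (idxI l)).Pairwise (· < ·) := by
  induction l using List.reverseRecOn with
  | nil => simp [PySem.Set.ofList]
  | append_singleton l x ih =>
    have hmapeq : ((PySem.Set.ofList l).map (idxI (l ++ [x]))) = ((PySem.Set.ofList l).map (idxI l)) := by
      refine List.map_congr_left (fun a ha => ?_)
      exact idxI_append_of_mem l [x] a ((PySem.Set.mem_ofList l a).1 ha)
    rw [ofList_append_singleton]
    by_cases hx : x ∈ l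
    · have hadd : PySem.Set.add (PySem.Set.ofList l) x = PySem.Set.ofList l := by
        simp [PySem.Set.add, PySem.Set.mem_ofList, hx]
      rw [hadd, hmapeq]; exact ih
    · have hadd : PySem.Set.add (PySem.Set.ofList l) x = PySem.Set.ofList l ++ [x] := by
        simp [PySem.Set.add, PySem.Set.mem_ofList, hx]
      rw [hadd, List.map_append, List.pairwise_append]
      refine ⟨by rw [hmapeq]; exact ih, by simp, ?_⟩
      intro v hv w hw
      simp only [List.map_cons, List.map_nil, List.mem_singleton] at hw
      rw [hmapeq] at hv
      obtain ⟨a, ha, rfl⟩ := List.mem_map.1 hv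
      have hal : a ∈ l := (PySem.Set.mem_ofList l a).1 ha
      have h1 : idxI l a < (l.length : Int) := idxI_lt l a hal
      have h2 : w = (l.length : Int) := by
        rw [hw]
        unfold idxI
        rw [PySem.List.index?_append_singleton_self l x hx]
        simp
      omega

-- B's firsts list is exactly the distinct atoms' first-occurrence indices in first-appearance order
theorem firsts_eq (l : List String) :
    PySem.List.sorted (PySem.Set.ofList (l.map (fun a => (((PySem.List.index? l a).getD 0 : Nat) : Int)))) (fun x => x) false
      = (PySem.Set.ofList l).map (idxI l) := by
  apply PySem.List.sorted_eq_of_perm_of_pairwise_lt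
  · refine (List.perm_ext_iff_of_nodup (pairwise_idx l).nodup (PySem.Set.nodup_ofList _)).2 ?_
    intro v
    simp only [List.mem_map, PySem.Set.mem_ofList]
    exact Iff.rfl
  · exact pairwise_idx l

-- indexing a map by an injectively mapped value finds the same position
theorem index?_map_inj (f : String → Int) (t : List String) (a : String)
    (hinj : ∀ b ∈ t, f b = f a → b = a) :
    PySem.List.index? (t.map f) (f a) = PySem.List.index? t a := by
  induction t with
  | nil => rfl
  | cons b t ih =>
    by_cases hba : b = a
    · subst hba
      rw [List.map_cons, PySem.List.index?_cons_self, PySem.List.index?_cons_self]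
    · have hfb : f b ≠ f a := fun h => hba (hinj b List.mem_cons_self h)
      rw [List.map_cons, PySem.List.index?_cons_of_ne _ hfb, PySem.List.index?_cons_of_ne _ hba,
        ih (fun c hc h => hinj c (List.mem_cons_of_mem b hc) h)]

-- A's table only grows by appending
theorem foldl_add_suffix (l t : List String) :
    ∃ s, l.foldl PySem.Set.add t = t ++ s := by
  induction l generalizing t with
  | nil => exact ⟨[], by simp⟩
  | cons a l ih =>
    simp only [List.foldl_cons]
    by_cases h : a ∈ t
    · have ha : PySem.Set.add t a = t := by simp [PySem.Set.add, h]
      rw [ha]; exact ih t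
    · have ha : PySem.Set.add t a = t ++ [a] := by simp [PySem.Set.add, h]
      obtain ⟨s, hs⟩ := ih (t ++ [a])
      refine ⟨a :: s, ?_⟩
      rw [ha, hs, List.append_assoc]
      rfl

-- characterisation of A's loop: final table, and every code reads the final table
theorem A_loop (l t : List String) (c : List Int) :
    l.foldl
      (fun st a =>
        let atomtype := if st.1.contains a then st.1 else st.1 ++ [a]
        (atomtype, st.2 ++ [(((PySem.List.index? atomtype a).getD 0 : Nat) : Int) + 1]))
      (t, c)
    = (l.foldl PySem.Set.add t,
       c ++ l.map (fun a => idxI (l.foldl PySem.Set.add t) a + 1)) := by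
  induction l generalizing t c with
  | nil => simp
  | cons a l ih =>
    simp only [List.foldl_cons, List.map_cons]
    rw [add_eq]
    rw [ih (PySem.Set.add t a) _]
    have hst : idxI (l.foldl PySem.Set.add (PySem.Set.add t a)) a = idxI (PySem.Set.add t a) a := by
      obtain ⟨s, hs⟩ := foldl_add_suffix l (PySem.Set.add t a)
      rw [hs]
      exact idxI_append_of_mem _ s a ((PySem.Set.mem_add _ _ _).2 (Or.inr rfl))
    rw [hst]
    simp [idxI]

-- B's atomtype: reading the list back at the first-occurrence indices returns the distinct atoms
theorem map_get (l : List String) :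
    ((PySem.Set.ofList l).map (idxI l)).map (fun i => (PySem.List.pyGet? l i).getD "")
      = PySem.Set.ofList l := by
  rw [List.map_map]
  conv_rhs => rw [← List.map_id (PySem.Set.ofList l)]
  apply List.map_congr_left
  intro a ha
  have hal : a ∈ l := (PySem.Set.mem_ofList l a).1 ha
  obtain ⟨k, hk, hlt, hget⟩ := idx_spec l a hal
  show (PySem.List.pyGet? l (((PySem.List.index? l a).getD 0 : Nat) : Int)).getD "" = id a
  rw [hk]
  simp only [Option.getD_some, PySem.List.pyGet?_natCast]
  rw [hget]
  rfl

-- ===== VERDICT (by name: the statement is the Claim_ definition above) =====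
theorem list2type_spec : Claim_equal_list2type := by
  intro l _
  show list2type l = list2type_alt l
  unfold list2type list2type_alt
  simp only []
  rw [A_loop l [] [], firsts_eq l, ← PySem.Set.ofList_eq_foldl]
  refine Prod.ext ?_ ?_
  · exact (map_get l).symm
  · show [] ++ l.map (fun a => idxI (PySem.Set.ofList l) a + 1)
        = l.map (fun a =>
            (((PySem.List.index? ((PySem.Set.ofList l).map (idxI l)) (idxI l a)).getD 0 : Nat) : Int) + 1)
    rw [List.nil_append]
    apply List.map_congr_left
    intro a ha
    have hT : a ∈ PySem.Set.ofList l := (PySem.Set.mem_ofList l a).2 ha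
    have hinj : ∀ b ∈ PySem.Set.ofList l, idxI l b = idxI l a → b = a :=
      fun b hb h => idxI_inj l b a ((PySem.Set.mem_ofList l b).1 hb) ha h
    rw [index?_map_inj (idxI l) (PySem.Set.ofList l) a hinj]
    rfl
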